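-- pv_equiv track=rewrite | github.com/szaboeman/adventOfCode2024py | day12.py | CornersCount
-- ===== SOURCE A (Python) =====
-- def CornersCount( cells):
--     corners = 0
--     for cell in cells:
--         for dx, dy in [(1, 1), (-1, 1), (1, -1), (-1, -1)]:
--             if ((cell[0] + dx, cell[1]) not in cells and (cell[0], cell[1] + dy) not in cells):
--                 corners += 1
--             if ((cell[0] + dx, cell[1]) in cells and (cell[0], cell[1] + dy) in cells and
--                     (cell[0] + dx, cell[1] + dy) not in cells):
--                 corners += 1
--     return corners
-- ===== SOURCE B (Python) =====
-- def CornersCount(cells):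
--     cellset = set(cells)
--     vertices = set()
--     for (x, y) in cellset:
--         vertices.update(((x, y), (x + 1, y), (x, y + 1), (x + 1, y + 1)))
--     total = 0
--     for (vx, vy) in vertices:
--         b00 = (vx - 1, vy - 1) in cellset
--         b10 = (vx, vy - 1) in cellset
--         b01 = (vx - 1, vy) in cellset
--         b11 = (vx, vy) in cellset
--         k = b00 + b10 + b01 + b11
--         if k == 1 or k == 3:
--             total += 1
--         elif k == 2 and b00 == b11:
--             total += 2
--     return total
-- ===== Notes on version B (the rewrite author's own statement) =====
-- stated objective: alternative
-- what changed: B replaces A's per-cell scan over four diagonal directions (each doing list-membership tests) by a vertex-based count: it puts the cells in a set, collects the distinct lattice vertices around them, and classifies each vertex once by its 2x2 occupancy pattern (1 or 3 cells -> +1, the two diagonal patterns -> +2).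
import Mathlib
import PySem

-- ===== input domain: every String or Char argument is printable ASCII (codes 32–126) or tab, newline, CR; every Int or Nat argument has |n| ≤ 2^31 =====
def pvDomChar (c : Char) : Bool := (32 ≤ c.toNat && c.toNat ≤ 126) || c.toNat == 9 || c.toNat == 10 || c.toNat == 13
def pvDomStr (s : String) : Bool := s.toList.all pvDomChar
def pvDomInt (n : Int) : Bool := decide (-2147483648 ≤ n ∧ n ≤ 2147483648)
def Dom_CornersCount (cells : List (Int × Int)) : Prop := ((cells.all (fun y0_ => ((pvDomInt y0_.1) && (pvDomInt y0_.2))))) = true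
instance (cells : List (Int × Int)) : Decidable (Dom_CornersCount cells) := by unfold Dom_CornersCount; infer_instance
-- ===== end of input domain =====

-- B counts corners per lattice vertex (classifying each vertex's 2x2 occupancy pattern) instead of
-- A's per-cell, per-direction scans over the cell list; Pre_ excludes duplicate cells (see below).


-- ===== PORT A =====
def pvDirsA : List (Int × Int) := [(1, 1), (-1, 1), (1, -1), (-1, -1)]

def pvStepA (cells : List (Int × Int)) (cell : Int × Int) (corners : Int) (d : Int × Int) : Int :=
  let c1 := if (cell.1 + d.1, cell.2) ∉ cells ∧ (cell.1, cell.2 + d.2) ∉ cells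
            then corners + 1 else corners
  if (cell.1 + d.1, cell.2) ∈ cells ∧ (cell.1, cell.2 + d.2) ∈ cells ∧
     (cell.1 + d.1, cell.2 + d.2) ∉ cells
  then c1 + 1 else c1

def CornersCount (cells : List (Int × Int)) : Int :=
  cells.foldl (fun corners cell => pvDirsA.foldl (pvStepA cells cell) corners) 0

-- ===== PORT B =====
-- the four lattice vertices surrounding cell (x, y)
def pvVerts (c : Int × Int) : List (Int × Int) :=
  [(c.1, c.2), (c.1 + 1, c.2), (c.1, c.2 + 1), (c.1 + 1, c.2 + 1)]

def pvStepB (cellset : PySem.Set (Int × Int)) (total : Int) (v : Int × Int) : Int :=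
  let b00 := PySem.Set.contains cellset (v.1 - 1, v.2 - 1)
  let b10 := PySem.Set.contains cellset (v.1, v.2 - 1)
  let b01 := PySem.Set.contains cellset (v.1 - 1, v.2)
  let b11 := PySem.Set.contains cellset (v.1, v.2)
  let k : Int := (if b00 then 1 else 0) + (if b10 then 1 else 0) +
                 (if b01 then 1 else 0) + (if b11 then 1 else 0)
  if k = 1 ∨ k = 3 then total + 1
  else if k = 2 ∧ b00 = b11 then total + 2
  else total

def CornersCount_alt (cells : List (Int × Int)) : Int :=
  let cellset : PySem.Set (Int × Int) := PySem.Set.ofList cells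
  let vertices : PySem.Set (Int × Int) :=
    cellset.foldl (fun vs c => PySem.Set.update vs (pvVerts c)) PySem.Set.empty
  vertices.foldl (pvStepB cellset) 0

-- ===== PRECONDITION & SPEC =====
-- Pre_ excludes lists containing a duplicate cell: a cell list stands for a set of region cells,
-- and on duplicates A's result accidentally depends on multiplicities (each occurrence is counted
-- again) while B counts the set of cells once; neither behaviour is specified, so such lists are excluded.
def Pre_CornersCount (cells : List (Int × Int)) : Prop := cells.Nodup
instance (cells : List (Int × Int)) : Decidable (Pre_CornersCount cells) := by
  unfold Pre_CornersCount; infer_instance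

def pvWitness_CornersCount : (List (Int × Int)) := [(0, 0), (1, 0), (1, 1)]

def Spec_CornersCount (cells : List (Int × Int)) (out : Int) : Prop := out = CornersCount_alt cells
instance (cells : List (Int × Int)) (out : Int) : Decidable (Spec_CornersCount cells out) := by unfold Spec_CornersCount; infer_instance

-- ===== CLAIM (what is proved, stated in full; the proofs are below) =====
def Claim_equal_CornersCount : Prop := ∀ (cells : List (Int × Int)), Dom_CornersCount cells → Pre_CornersCount cells → Spec_CornersCount cells (CornersCount cells)

-- ===== LEMMAS AND PROOFS =====

-- contribution of one direction of A's inner loop, as a summand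
def pvGA (cells : List (Int × Int)) (c d : Int × Int) : Int :=
  (if (c.1 + d.1, c.2) ∉ cells ∧ (c.1, c.2 + d.2) ∉ cells then 1 else 0) +
  (if (c.1 + d.1, c.2) ∈ cells ∧ (c.1, c.2 + d.2) ∈ cells ∧ (c.1 + d.1, c.2 + d.2) ∉ cells
   then 1 else 0)

-- contribution of cell c at vertex v (c a quadrant cell of v); mirrors pvGA via reflection
def pvW (cells : List (Int × Int)) (v c : Int × Int) : Int :=
  (if (2 * v.1 - 1 - c.1, c.2) ∉ cells ∧ (c.1, 2 * v.2 - 1 - c.2) ∉ cells then 1 else 0) +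
  (if (2 * v.1 - 1 - c.1, c.2) ∈ cells ∧ (c.1, 2 * v.2 - 1 - c.2) ∈ cells ∧
      (2 * v.1 - 1 - c.1, 2 * v.2 - 1 - c.2) ∉ cells then 1 else 0)

-- per-vertex contribution, Prop form (mirrors pvStepB)
def pvH (cells : List (Int × Int)) (v : Int × Int) : Int :=
  let k : Int := (if (v.1 - 1, v.2 - 1) ∈ cells then 1 else 0) +
                 (if (v.1, v.2 - 1) ∈ cells then 1 else 0) +
                 (if (v.1 - 1, v.2) ∈ cells then 1 else 0) +
                 (if (v.1, v.2) ∈ cells then 1 else 0)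
  if k = 1 ∨ k = 3 then 1
  else if k = 2 ∧ ((v.1 - 1, v.2 - 1) ∈ cells ↔ (v.1, v.2) ∈ cells) then 2
  else 0

-- the four quadrant cells around vertex v
def pvQuads (v : Int × Int) : List (Int × Int) :=
  [(v.1 - 1, v.2 - 1), (v.1, v.2 - 1), (v.1 - 1, v.2), (v.1, v.2)]

lemma stepA_eq (cells : List (Int × Int)) (c : Int × Int) (a : Int) (d : Int × Int) :
    pvStepA cells c a d = a + pvGA cells c d := by
  simp only [pvStepA, pvGA]; split_ifs <;> omega

lemma contains_ofList (cells : List (Int × Int)) (x : Int × Int) :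
    PySem.Set.contains (PySem.Set.ofList cells) x = decide (x ∈ cells) := by
  simp [PySem.Set.mem_ofList]

lemma stepB_eq (cells : List (Int × Int)) (a : Int) (v : Int × Int) :
    pvStepB (PySem.Set.ofList cells) a v = a + pvH cells v := by
  simp only [pvStepB, pvH, contains_ofList]
  by_cases h00 : (v.1 - 1, v.2 - 1) ∈ cells <;>
  by_cases h10 : (v.1, v.2 - 1) ∈ cells <;>
  by_cases h01 : (v.1 - 1, v.2) ∈ cells <;>
  by_cases h11 : (v.1, v.2) ∈ cells <;>
  simp [h00, h10, h01, h11]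

lemma gA_eq_w₁ (cells : List (Int × Int)) (c : Int × Int) :
    pvGA cells c (1, 1) = pvW cells (c.1 + 1, c.2 + 1) c := by
  have h1 : (2 * (c.1 + 1) - 1 - c.1 : Int) = c.1 + 1 := by ring
  have h2 : (2 * (c.2 + 1) - 1 - c.2 : Int) = c.2 + 1 := by ring
  simp only [pvGA, pvW, h1, h2]

lemma gA_eq_w₂ (cells : List (Int × Int)) (c : Int × Int) :
    pvGA cells c (-1, 1) = pvW cells (c.1, c.2 + 1) c := by
  have h1 : (2 * c.1 - 1 - c.1 : Int) = c.1 + -1 := by ring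
  have h2 : (2 * (c.2 + 1) - 1 - c.2 : Int) = c.2 + 1 := by ring
  simp only [pvGA, pvW, h1, h2]

lemma gA_eq_w₃ (cells : List (Int × Int)) (c : Int × Int) :
    pvGA cells c (1, -1) = pvW cells (c.1 + 1, c.2) c := by
  have h1 : (2 * (c.1 + 1) - 1 - c.1 : Int) = c.1 + 1 := by ring
  have h2 : (2 * c.2 - 1 - c.2 : Int) = c.2 + -1 := by ring
  simp only [pvGA, pvW, h1, h2]

lemma gA_eq_w₄ (cells : List (Int × Int)) (c : Int × Int) :
    pvGA cells c (-1, -1) = pvW cells (c.1, c.2) c := by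
  have h1 : (2 * c.1 - 1 - c.1 : Int) = c.1 + -1 := by ring
  have h2 : (2 * c.2 - 1 - c.2 : Int) = c.2 + -1 := by ring
  simp only [pvGA, pvW, h1, h2]

-- A's inner loop = sum of per-vertex contributions of this cell
lemma innerA (cells : List (Int × Int)) (c : Int × Int) (a : Int) :
    pvDirsA.foldl (pvStepA cells c) a = a + ((pvVerts c).map (fun v => pvW cells v c)).sum := by
  simp only [pvDirsA, List.foldl_cons, List.foldl_nil, stepA_eq,
    gA_eq_w₁, gA_eq_w₂, gA_eq_w₃, gA_eq_w₄, pvVerts, List.map_cons, List.map_nil,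
    List.sum_cons, List.sum_nil]
  ring

lemma A_sum (cells : List (Int × Int)) :
    CornersCount cells
      = (cells.map (fun c => ((pvVerts c).map (fun v => pvW cells v c)).sum)).sum := by
  unfold CornersCount
  have : (fun (corners : Int) (cell : Int × Int) => pvDirsA.foldl (pvStepA cells cell) corners)
       = fun corners cell => corners + ((pvVerts cell).map (fun v => pvW cells v cell)).sum := by
    funext a c; exact innerA cells c a
  rw [this, PySem.List.foldl_add]
  omega

-- the vertex-set built by B, as a list
def pvVList (cells : List (Int × Int)) : PySem.Set (Int × Int) :=
  (PySem.Set.ofList cells).foldl (fun vs c => PySem.Set.update vs (pvVerts c)) PySem.Set.empty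

lemma mem_foldl_update (l : List (Int × Int)) (s : PySem.Set (Int × Int)) (y : Int × Int) :
    y ∈ l.foldl (fun vs c => PySem.Set.update vs (pvVerts c)) s ↔
      y ∈ s ∨ ∃ c ∈ l, y ∈ pvVerts c := by
  induction l generalizing s with
  | nil => simp
  | cons c l ih =>
    simp only [List.foldl_cons, ih, PySem.Set.mem_update, List.mem_cons]
    constructor
    · rintro ((h | h) | ⟨c', hc', h⟩)
      · exact Or.inl h
      · exact Or.inr ⟨c, Or.inl rfl, h⟩
      · exact Or.inr ⟨c', Or.inr hc', h⟩
    · rintro (h | ⟨c', (rfl | hc'), h⟩)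
      · exact Or.inl (Or.inl h)
      · exact Or.inl (Or.inr h)
      · exact Or.inr ⟨c', hc', h⟩

lemma nodup_foldl_update (l : List (Int × Int)) (s : PySem.Set (Int × Int)) (hs : s.Nodup) :
    (l.foldl (fun vs c => PySem.Set.update vs (pvVerts c)) s).Nodup := by
  induction l generalizing s with
  | nil => exact hs
  | cons c l ih => exact ih _ (PySem.Set.nodup_update _ _ hs)

lemma mem_vlist (cells : List (Int × Int)) (y : Int × Int) :
    y ∈ pvVList cells ↔ ∃ c ∈ cells, y ∈ pvVerts c := by
  unfold pvVList
  rw [mem_foldl_update]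
  simp [PySem.Set.mem_ofList, PySem.Set.empty]

lemma nodup_vlist (cells : List (Int × Int)) : (pvVList cells).Nodup := by
  unfold pvVList
  exact nodup_foldl_update _ _ List.nodup_nil

lemma B_sum (cells : List (Int × Int)) :
    CornersCount_alt cells = ((pvVList cells).map (pvH cells)).sum := by
  unfold CornersCount_alt
  have : (pvStepB (PySem.Set.ofList cells))
       = fun a v => a + pvH cells v := by
    funext a v; exact stepB_eq cells a v
  simp only [pvVList]
  rw [this, PySem.List.foldl_add]
  omega

lemma nodup_verts (c : Int × Int) : (pvVerts c).Nodup := by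
  simp [pvVerts, Prod.ext_iff]

lemma nodup_quads (v : Int × Int) : (pvQuads v).Nodup := by
  simp [pvQuads, Prod.ext_iff]

lemma mem_verts_iff (v c : Int × Int) : v ∈ pvVerts c ↔ c ∈ pvQuads v := by
  simp only [pvVerts, pvQuads, List.mem_cons, List.not_mem_nil, or_false,
    Prod.ext_iff]
  omega

-- quadrant evaluation lemmas for pvW
lemma w_q00 (cells : List (Int × Int)) (v : Int × Int) :
    pvW cells v (v.1 - 1, v.2 - 1)
      = (if (v.1, v.2 - 1) ∉ cells ∧ (v.1 - 1, v.2) ∉ cells then 1 else 0) +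
        (if (v.1, v.2 - 1) ∈ cells ∧ (v.1 - 1, v.2) ∈ cells ∧ (v.1, v.2) ∉ cells then 1 else 0) := by
  have h1 : (2 * v.1 - 1 - (v.1 - 1) : Int) = v.1 := by ring
  have h2 : (2 * v.2 - 1 - (v.2 - 1) : Int) = v.2 := by ring
  simp only [pvW, h1, h2]

lemma w_q10 (cells : List (Int × Int)) (v : Int × Int) :
    pvW cells v (v.1, v.2 - 1)
      = (if (v.1 - 1, v.2 - 1) ∉ cells ∧ (v.1, v.2) ∉ cells then 1 else 0) +
        (if (v.1 - 1, v.2 - 1) ∈ cells ∧ (v.1, v.2) ∈ cells ∧ (v.1 - 1, v.2) ∉ cells then 1 else 0) := by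
  have h1 : (2 * v.1 - 1 - v.1 : Int) = v.1 - 1 := by ring
  have h2 : (2 * v.2 - 1 - (v.2 - 1) : Int) = v.2 := by ring
  simp only [pvW, h1, h2]

lemma w_q01 (cells : List (Int × Int)) (v : Int × Int) :
    pvW cells v (v.1 - 1, v.2)
      = (if (v.1, v.2) ∉ cells ∧ (v.1 - 1, v.2 - 1) ∉ cells then 1 else 0) +
        (if (v.1, v.2) ∈ cells ∧ (v.1 - 1, v.2 - 1) ∈ cells ∧ (v.1, v.2 - 1) ∉ cells then 1 else 0) := by
  have h1 : (2 * v.1 - 1 - (v.1 - 1) : Int) = v.1 := by ring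
  have h2 : (2 * v.2 - 1 - v.2 : Int) = v.2 - 1 := by ring
  simp only [pvW, h1, h2]

lemma w_q11 (cells : List (Int × Int)) (v : Int × Int) :
    pvW cells v (v.1, v.2)
      = (if (v.1 - 1, v.2) ∉ cells ∧ (v.1, v.2 - 1) ∉ cells then 1 else 0) +
        (if (v.1 - 1, v.2) ∈ cells ∧ (v.1, v.2 - 1) ∈ cells ∧ (v.1 - 1, v.2 - 1) ∉ cells then 1 else 0) := by
  have h1 : (2 * v.1 - 1 - v.1 : Int) = v.1 - 1 := by ring
  have h2 : (2 * v.2 - 1 - v.2 : Int) = v.2 - 1 := by ring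
  simp only [pvW, h1, h2]

-- per-vertex collapse: summing the quadrant contributions gives the pattern classification
lemma quad_sum (cells : List (Int × Int)) (v : Int × Int) :
    ((pvQuads v).map (fun c => if c ∈ cells then pvW cells v c else 0)).sum = pvH cells v := by
  simp only [pvQuads, List.map_cons, List.map_nil, List.sum_cons, List.sum_nil,
    w_q00, w_q10, w_q01, w_q11, pvH]
  by_cases h00 : (v.1 - 1, v.2 - 1) ∈ cells <;>
  by_cases h10 : (v.1, v.2 - 1) ∈ cells <;>
  by_cases h01 : (v.1 - 1, v.2) ∈ cells <;>
  by_cases h11 : (v.1, v.2) ∈ cells <;>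
  simp [h00, h10, h01, h11]

lemma verts_subset_vlist (cells : List (Int × Int)) {c : Int × Int} (hc : c ∈ cells) :
    (pvVerts c).toFinset ⊆ (pvVList cells).toFinset := by
  intro v hv
  rw [List.mem_toFinset] at hv ⊢
  exact (mem_vlist cells v).mpr ⟨c, hc, hv⟩

theorem CornersCount_spec : Claim_equal_CornersCount := by
  intro cells _ hpre
  unfold Spec_CornersCount
  rw [A_sum, B_sum]
  rw [← List.sum_toFinset _ hpre, ← List.sum_toFinset _ (nodup_vlist cells)]
  have hcell : ∀ c ∈ cells.toFinset,
      ((pvVerts c).map (fun v => pvW cells v c)).sum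
        = ∑ v ∈ (pvVList cells).toFinset, (if v ∈ pvVerts c then pvW cells v c else 0) := by
    intro c hc
    rw [List.mem_toFinset] at hc
    have : ∀ v : Int × Int, (v ∈ pvVerts c) = (v ∈ (pvVerts c).toFinset) := by
      intro v; simp [List.mem_toFinset]
    simp only [this]
    rw [Finset.sum_ite_mem,
        Finset.inter_eq_right.mpr (verts_subset_vlist cells hc),
        List.sum_toFinset _ (nodup_verts c)]
  rw [Finset.sum_congr rfl hcell, Finset.sum_comm]
  apply Finset.sum_congr rfl
  intro v _
  have hcond : ∀ c : Int × Int, (v ∈ pvVerts c) = (c ∈ (pvQuads v).toFinset) := by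
    intro c; simp [List.mem_toFinset, mem_verts_iff]
  simp only [hcond]
  rw [Finset.sum_ite_mem, Finset.inter_comm, ← Finset.sum_ite_mem,
      List.sum_toFinset _ (nodup_quads v)]
  rw [← quad_sum cells v]
  apply congrArg
  apply List.map_congr_left
  intro c _
  simp [List.mem_toFinset]
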